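-- pv_equiv track=rewrite | github.com/momotofu/code-solutions | codility/raku.py | solution
-- ===== SOURCE A (Python) =====
-- def solution(A):
--     """
--     Computes the pair indices in the array, and then returns the
--     maximum distances between an index pair.
--     """
--     # find all pair indices
--     max_value = 0 # keep track of max value
--
--     # make a dictionary of every occuring integer, with an array with indice values.
--     occurances = {}
--     for i in range(len(A)):
--         cur = A[i]
--         if not cur in occurances.keys():
--             occurances[cur] = []
--         occurances[cur].append(i)
--
--     # keep track of largest distance
--     max_distance = 0
--     # adjacent_values = []
--     prev = []
--     prev_set = False
--
--     # populate adjecent_values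
--     for key, value in sorted(occurances.items()):
--         if not prev_set:
--             prev = value
--             prev_set = True
--         else:
--             for i in range(len(prev)):
--                 for j in range(len(value)):
--                     # adjacent_values.append((prev[i], value[j]))
--                     distance = get_distance(prev[i], value[j])
--                     if distance > max_distance:
--                         max_distance = distance
--             prev_set = False
--
--     # otherwise return -1
--     return -1 if max_distance == 0 else max_distance
--
-- def get_distance(x, y):
--     return abs(x - y)
-- ===== SOURCE B (Python) =====
-- def solution(A):
--     """
--     Computes the pair indices in the array, and then returns the
--     maximum distances between an index pair.
--     """
--     # one pass: first and last index of occurrence of every value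
--     first = {}
--     last = {}
--     for i, v in enumerate(A):
--         if v not in first:
--             first[v] = i
--         last[v] = i
--     # pair up consecutive sorted values; the widest pair distance uses
--     # only the extreme indices of each group
--     best = 0
--     prev = None
--     for v in sorted(first):
--         if prev is None:
--             prev = v
--         else:
--             best = max(best, last[prev] - first[v], last[v] - first[prev])
--             prev = None
--     return best if best > 0 else -1
-- ===== Notes on version B (the rewrite author's own statement) =====
-- stated objective: faster
-- what changed: B keeps only the first and last index of each value (two plain dicts filled in one pass) and scores each consecutive sorted-value pair with the endpoint formula max(last1-first2, last2-first1), replacing A's dict of full index lists and its all-pairs nested distance loops; intended as faster (asymptotic on duplicate-heavy inputs, where A's inner loops are quadratic), measured 1.4x-1.8x by the probe on its mixed random inputs.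
import Mathlib
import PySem

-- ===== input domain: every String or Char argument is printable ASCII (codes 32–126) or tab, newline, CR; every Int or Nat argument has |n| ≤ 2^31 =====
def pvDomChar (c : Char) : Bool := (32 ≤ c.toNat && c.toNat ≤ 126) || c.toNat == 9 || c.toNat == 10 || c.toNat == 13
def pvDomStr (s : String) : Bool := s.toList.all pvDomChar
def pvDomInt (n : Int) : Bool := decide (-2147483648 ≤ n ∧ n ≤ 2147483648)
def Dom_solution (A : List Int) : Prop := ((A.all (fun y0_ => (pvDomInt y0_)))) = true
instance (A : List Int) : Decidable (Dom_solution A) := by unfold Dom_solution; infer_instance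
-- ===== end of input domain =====

-- B replaces A's dict of full index lists and all-pairs nested distance loops by one-pass
-- first/last-index dicts and an O(1) endpoint formula per consecutive sorted value pair
-- (objective: faster; asymptotic on duplicate-heavy inputs, where A's inner loops are
-- quadratic -- a timing run measured about 1.4-1.8x on its mixed random inputs).

-- ===== PORT A =====
def get_distance (x y : Int) : Int := |x - y|

-- one step of A's dict-building loop: if cur not in occ: occ[cur] = []; occ[cur].append(i)
def occStep (occ : PySem.Dict Int (List Int)) (i cur : Int) : PySem.Dict Int (List Int) :=
  let occ' := if !(occ.contains cur) then occ.insert cur ([] : List Int) else occ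
  occ'.modify cur [] (fun l => l ++ [i])

-- one step of A's loop over sorted(occurances.items()); state (max_distance, prev, prev_set)
def pairLoopA (st : Int × List Int × Bool) (kv : Int × List Int) : Int × List Int × Bool :=
  match st with
  | (md, prev, ps) =>
    if !ps then (md, kv.2, true)
    else
      ((PySem.List.pyRange 0 (PySem.List.len prev)).foldl (fun md1 i =>
        (PySem.List.pyRange 0 (PySem.List.len kv.2)).foldl (fun md2 j =>
          let d := get_distance (PySem.List.pyGetD prev i 0) (PySem.List.pyGetD kv.2 j 0)
          if d > md2 then d else md2) md1) md, prev, false)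

-- sorted(occurances.items()) compares tuples; dict keys are distinct, so this equals
-- sorting by the key component (exact here: list comparison is never reached on ties).
def solution (A : List Int) : Int :=
  let occurances := (PySem.List.pyRange 0 (PySem.List.len A)).foldl
      (fun occ i => occStep occ i (PySem.List.pyGetD A i 0)) PySem.Dict.empty
  let st := (PySem.List.sorted occurances.items (fun p => p.1)).foldl pairLoopA (0, [], false)
  if st.1 = 0 then -1 else st.1

-- ===== PORT B =====
-- one step of B's first/last building loop over enumerate(A)
def boundsStep (fl : PySem.Dict Int Int × PySem.Dict Int Int) (iv : Int × Int) :
    PySem.Dict Int Int × PySem.Dict Int Int :=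
  let first := if !(fl.1.contains iv.2) then fl.1.insert iv.2 iv.1 else fl.1
  (first, fl.2.insert iv.2 iv.1)

-- one step of B's loop over sorted(first); state (best, prev)
-- (first[v] / last[v] are ported as getD with a dummy default: v is always a key)
def pairLoopB (first last : PySem.Dict Int Int) (st : Int × Option Int) (v : Int) :
    Int × Option Int :=
  match st with
  | (best, none) => (best, some v)
  | (best, some pv) =>
      (max (max best (last.getD pv 0 - first.getD v 0)) (last.getD v 0 - first.getD pv 0), none)

def solution_alt (A : List Int) : Int :=
  let fl := (PySem.List.enumerate A).foldl boundsStep (PySem.Dict.empty, PySem.Dict.empty)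
  let st := (PySem.List.sorted fl.1.keys (fun v => v)).foldl (pairLoopB fl.1 fl.2) (0, none)
  if st.1 > 0 then st.1 else -1

-- ===== PRECONDITION & SPEC =====
def Spec_solution (A : List Int) (out : Int) : Prop := out = solution_alt A
instance (A : List Int) (out : Int) : Decidable (Spec_solution A out) := by unfold Spec_solution; infer_instance

-- ===== CLAIM (what is proved, stated in full; the proofs are below) =====
def Claim_equal_solution : Prop := ∀ (A : List Int), Dom_solution A → Spec_solution A (solution A)

-- ===== LEMMAS AND PROOFS =====

-- a well-formed group of indices: nonempty and ascending
def okG (l : List Int) : Prop := l ≠ [] ∧ l.Pairwise (· ≤ ·)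

theorem ifmax (a b : Int) : (if b > a then b else a) = max a b := by
  rw [max_def]; split_ifs <;> omega

theorem getLastD_mem_cons (t : List Int) : ∀ a : Int, t.getLastD a ∈ a :: t := by
  induction t with
  | nil => intro a; simp
  | cons b t' ih => intro a; rw [List.getLastD_cons]; exact List.mem_cons_of_mem a (ih b)

theorem getLastD_default_irrel (t : List Int) (h : t ≠ []) (a b : Int) :
    t.getLastD a = t.getLastD b := by
  cases t with
  | nil => exact absurd rfl h
  | cons c t' => rw [List.getLastD_cons, List.getLastD_cons]

theorem headD_mem {l : List Int} (h : l ≠ []) : l.headD 0 ∈ l := by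
  cases l with
  | nil => exact absurd rfl h
  | cons a t => exact List.mem_cons_self

theorem getLastD_mem {l : List Int} (h : l ≠ []) : l.getLastD 0 ∈ l := by
  cases l with
  | nil => exact absurd rfl h
  | cons a t => rw [List.getLastD_cons]; exact getLastD_mem_cons t a

theorem sorted_le_getLastD (l : List Int) (hs : l.Pairwise (· ≤ ·)) :
    ∀ x ∈ l, x ≤ l.getLastD 0 := by
  induction l with
  | nil => simp
  | cons a t ih =>
      intro x hx
      rw [List.getLastD_cons]
      rcases List.pairwise_cons.mp hs with ⟨ha, ht⟩
      rcases List.mem_cons.mp hx with rfl | hx'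
      · rcases List.mem_cons.mp (getLastD_mem_cons t x) with h | h
        · omega
        · exact ha _ h
      · have hne : t ≠ [] := List.ne_nil_of_mem hx'
        rw [getLastD_default_irrel t hne a 0]
        exact ih ht x hx'

theorem okG_bounds {l : List Int} (h : okG l) : ∀ x ∈ l, l.headD 0 ≤ x ∧ x ≤ l.getLastD 0 := by
  intro x hx
  refine ⟨?_, sorted_le_getLastD l h.2 x hx⟩
  cases l with
  | nil => cases hx
  | cons a t =>
      rcases List.mem_cons.mp hx with rfl | hx'
      · simp
      · exact (List.pairwise_cons.mp h.2).1 x hx'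

-- upper bound for a running max
theorem foldl_max_le {α : Type} (l : List α) (f : α → Int) (m c : Int)
    (h0 : m ≤ c) (h : ∀ x ∈ l, f x ≤ c) :
    l.foldl (fun m x => max m (f x)) m ≤ c := by
  induction l generalizing m with
  | nil => exact h0
  | cons a t ih =>
      exact ih _ (max_le h0 (h a List.mem_cons_self)) (fun x hx => h x (List.mem_cons_of_mem a hx))

-- the all-pairs running max of |x - y|
def nmax (md : Int) (P Q : List Int) : Int :=
  P.foldl (fun m x => Q.foldl (fun m y => max m |x - y|) m) md

theorem le_nmax (md : Int) (P Q : List Int) : md ≤ nmax md P Q := by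
  induction P generalizing md with
  | nil => exact le_refl _
  | cons a t ih =>
      simp only [nmax, List.foldl_cons]
      exact le_trans (PySem.List.le_foldl_max_int Q (fun y => |a - y|) md).1 (ih _)

theorem nmax_le (md : Int) (P Q : List Int) (c : Int) (h0 : md ≤ c)
    (h : ∀ x ∈ P, ∀ y ∈ Q, |x - y| ≤ c) : nmax md P Q ≤ c := by
  induction P generalizing md with
  | nil => exact h0
  | cons a t ih =>
      simp only [nmax, List.foldl_cons]
      exact ih _ (foldl_max_le Q _ md c h0 (h a List.mem_cons_self))
        (fun x hx => h x (List.mem_cons_of_mem a hx))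

theorem pair_le_nmax (P Q : List Int) (y : Int) (hy : y ∈ Q) :
    ∀ (md x : Int), x ∈ P → |x - y| ≤ nmax md P Q := by
  induction P with
  | nil => intro md x hx; cases hx
  | cons a t ih =>
      intro md x hx
      simp only [nmax, List.foldl_cons]
      rcases List.mem_cons.mp hx with rfl | hx'
      · exact le_trans ((PySem.List.le_foldl_max_int Q (fun y => |x - y|) md).2 y hy)
          (le_nmax _ t Q)
      · exact ih _ x hx'

-- the endpoint formula for the all-pairs max over two ascending nonempty groups
theorem nmax_eq (md : Int) (P Q : List Int) (hP : okG P) (hQ : okG Q) :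
    nmax md P Q = max (max md (P.getLastD 0 - Q.headD 0)) (Q.getLastD 0 - P.headD 0) := by
  apply le_antisymm
  · refine nmax_le md P Q _ (le_max_of_le_left (le_max_left md _)) (fun x hx y hy => ?_)
    rcases okG_bounds hP x hx with ⟨hx1, hx2⟩
    rcases okG_bounds hQ y hy with ⟨hy1, hy2⟩
    rw [abs_sub_le_iff]
    have e1 : x - y ≤ P.getLastD 0 - Q.headD 0 := by omega
    have e2 : y - x ≤ Q.getLastD 0 - P.headD 0 := by omega
    exact ⟨le_max_of_le_left (le_max_of_le_right e1), le_max_of_le_right e2⟩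
  · refine max_le (max_le (le_nmax _ _ _) ?_) ?_
    · exact le_trans (le_abs_self _)
        (pair_le_nmax P Q _ (headD_mem hQ.1) md _ (getLastD_mem hP.1))
    · have h2 : Q.getLastD 0 - P.headD 0 ≤ |P.headD 0 - Q.getLastD 0| := by
        rw [abs_sub_comm]; exact le_abs_self _
      exact le_trans h2 (pair_le_nmax P Q _ (getLastD_mem hQ.1) md _ (headD_mem hP.1))

-- A's nested index loops compute nmax
theorem nestedA_eq (md : Int) (P Q : List Int) :
    (PySem.List.pyRange 0 (PySem.List.len P)).foldl (fun md1 i =>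
      (PySem.List.pyRange 0 (PySem.List.len Q)).foldl (fun md2 j =>
        let d := get_distance (PySem.List.pyGetD P i 0) (PySem.List.pyGetD Q j 0)
        if d > md2 then d else md2) md1) md = nmax md P Q := by
  have inner : ∀ (x m : Int),
      (PySem.List.pyRange 0 (PySem.List.len Q)).foldl (fun md2 j =>
        let d := get_distance x (PySem.List.pyGetD Q j 0)
        if d > md2 then d else md2) m = Q.foldl (fun m y => max m |x - y|) m := by
    intro x m
    rw [PySem.List.foldl_pyRange_zero_pyGetD Q 0
      (fun md2 y => let d := get_distance x y; if d > md2 then d else md2) m]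
    refine PySem.List.foldl_congr_mem Q _ _ m (fun acc y _ => ?_)
    simp only [get_distance, ifmax]
  rw [PySem.List.foldl_pyRange_zero_pyGetD P 0
    (fun md1 x => (PySem.List.pyRange 0 (PySem.List.len Q)).foldl (fun md2 j =>
      let d := get_distance x (PySem.List.pyGetD Q j 0)
      if d > md2 then d else md2) md1) md]
  exact PySem.List.foldl_congr_mem P _ _ md (fun acc x _ => inner x acc)

-- a fst-preserving projection of A's dict transfers through getD (g [] = 0 covers a miss)
theorem getD_rel (g : List Int → Int) (hg : g [] = 0) (dA : PySem.Dict Int (List Int))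
    (dB : PySem.Dict Int Int) (hrel : dB.items = dA.items.map (fun p => (p.1, g p.2)))
    (k : Int) : dB.getD k 0 = g (dA.getD k []) := by
  have hp : ((fun p : Int × Int => p.1 == k) ∘ (fun p : Int × List Int => (p.1, g p.2))) =
      (fun p : Int × List Int => p.1 == k) := rfl
  simp only [PySem.Dict.getD, PySem.Dict.get?, hrel, List.find?_map, hp]
  cases List.find? (fun p : Int × List Int => p.1 == k) dA.items with
  | none => exact hg.symm
  | some q => rfl

theorem contains_rel (g : List Int → Int) (dA : PySem.Dict Int (List Int))
    (dB : PySem.Dict Int Int) (hrel : dB.items = dA.items.map (fun p => (p.1, g p.2)))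
    (k : Int) : dB.contains k = dA.contains k := by
  simp only [PySem.Dict.contains, hrel, List.any_map]
  rfl

theorem mem_items_of_get? (d : PySem.Dict Int (List Int)) (k : Int) (w : List Int)
    (h : d.get? k = some w) : (k, w) ∈ d.items := by
  cases hf : List.find? (fun p : Int × List Int => p.1 == k) d.items with
  | none => simp [PySem.Dict.get?, hf] at h
  | some q =>
      have hq := List.mem_of_find?_eq_some hf
      have hpq := List.find?_some hf
      simp only [PySem.Dict.get?, hf, Option.map_some, Option.some.injEq] at h
      obtain ⟨q1, q2⟩ := q
      simp only [beq_iff_eq] at hpq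
      subst hpq; subst h
      exact hq

-- the relation between A's dict and B's two dicts
def DRel (dA : PySem.Dict Int (List Int)) (first last : PySem.Dict Int Int) : Prop :=
  first.items = dA.items.map (fun p => (p.1, p.2.headD 0)) ∧
  last.items = dA.items.map (fun p => (p.1, p.2.getLastD 0))

-- one step of the two building loops preserves the relation
theorem step_rel (dA : PySem.Dict Int (List Int)) (first last : PySem.Dict Int Int) (i v : Int)
    (hnd : dA.keys.Nodup) (hrel : DRel dA first last)
    (hok : ∀ p ∈ dA.items, okG p.2) (hbd : ∀ p ∈ dA.items, ∀ x ∈ p.2, x < i) :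
    (occStep dA i v).keys.Nodup ∧
    DRel (occStep dA i v) (boundsStep (first, last) (i, v)).1
      (boundsStep (first, last) (i, v)).2 ∧
    (∀ p ∈ (occStep dA i v).items, okG p.2) ∧
    (∀ p ∈ (occStep dA i v).items, ∀ x ∈ p.2, x ≤ i) := by
  obtain ⟨hrel1, hrel2⟩ := hrel
  have hcF := contains_rel (fun l => l.headD 0) dA first hrel1 v
  have hcL := contains_rel (fun l => l.getLastD 0) dA last hrel2 v
  by_cases hc : dA.contains v = true
  · -- existing key: A appends i to its list, B keeps first[v] and overwrites last[v]
    have hget : dA.get? v = some (dA.getD v []) := by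
      cases hg : dA.get? v with
      | none =>
          rw [PySem.Dict.get?_eq_none_iff_contains] at hg
          rw [hg] at hc; cases hc
      | some w => simp [PySem.Dict.getD, hg]
    set l := dA.getD v [] with hl
    clear_value l
    have hmem : (v, l) ∈ dA.items := mem_items_of_get? dA v l hget
    have hlok := hok _ hmem
    have hlbd := hbd _ hmem
    have hlne : l ≠ [] := hlok.1
    have huniq : ∀ p ∈ dA.items, p.1 = v → p.2 = l := by
      intro p hp hpv
      have h1 : dA.get? p.1 = some p.2 := PySem.Dict.get?_of_mem_items dA hp hnd
      rw [hpv, hget] at h1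
      exact (Option.some_inj.mp h1).symm
    have eA : occStep dA i v = dA.insert v (l ++ [i]) := by
      simp only [occStep, hc, Bool.not_true, Bool.false_eq_true, if_false, PySem.Dict.modify]
      rw [← hl]
    have eB : boundsStep (first, last) (i, v) = (first, last.insert v i) := by
      simp only [boundsStep, hcF, hc, Bool.not_true, Bool.false_eq_true, if_false]
    rw [eA, eB]
    have hiA : (dA.insert v (l ++ [i])).items =
        dA.items.map (fun p => if p.1 == v then (v, l ++ [i]) else p) :=
      PySem.Dict.items_insert_of_contains dA _ hc
    have hiL : (last.insert v i).items =
        last.items.map (fun p => if p.1 == v then (v, i) else p) :=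
      PySem.Dict.items_insert_of_contains last _ (by rw [hcL]; exact hc)
    have hlast : (l ++ [i]).getLastD 0 = i := by
      rw [List.getLastD_eq_getLast?, List.getLast?_concat]; rfl
    have hhead : (l ++ [i]).headD 0 = l.headD 0 := by
      cases l with
      | nil => exact absurd rfl hlne
      | cons a t => rfl
    refine ⟨PySem.Dict.nodup_keys_insert dA v _ hnd, ⟨?_, ?_⟩, ?_, ?_⟩
    · -- first is unchanged: the head of the v-group does not move
      rw [hrel1, hiA, List.map_map]
      apply (List.map_congr_left ?_).symm
      intro p hp
      simp only [Function.comp_apply]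
      by_cases hpv : p.1 = v
      · have hp2 : p.2 = l := huniq p hp hpv
        rw [if_pos (beq_iff_eq.mpr hpv)]
        show (v, (l ++ [i]).headD 0) = (p.1, p.2.headD 0)
        rw [hhead, hpv, hp2]
      · rw [if_neg (by simpa using hpv)]
    · rw [hiL, hrel2, hiA, List.map_map, List.map_map]
      apply List.map_congr_left
      intro p hp
      simp only [Function.comp_apply]
      by_cases hpv : p.1 = v
      · have hp2 : p.2 = l := huniq p hp hpv
        have hbeq : (p.1 == v) = true := beq_iff_eq.mpr hpv
        rw [if_pos hbeq, if_pos hbeq]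
        show (v, i) = (v, (l ++ [i]).getLastD 0)
        rw [hlast]
      · have hbeq : (p.1 == v) = false := by simpa using hpv
        rw [if_neg (by simp [hbeq]), if_neg (by simp [hbeq])]
    · intro p hp
      rw [hiA] at hp
      obtain ⟨q, hq, hq2⟩ := List.mem_map.mp hp
      by_cases hqv : q.1 = v
      · have hq2' : q.2 = l := huniq q hq hqv
        rw [if_pos (beq_iff_eq.mpr hqv)] at hq2
        subst hq2
        refine ⟨by simp, ?_⟩
        rw [List.pairwise_append]
        refine ⟨hlok.2, List.pairwise_singleton _ _, ?_⟩
        intro a ha b hb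
        rw [List.mem_singleton] at hb
        subst hb
        have := hlbd a (hq2' ▸ ha)
        omega
      · rw [if_neg (by simpa using hqv)] at hq2
        subst hq2
        exact hok q hq
    · intro p hp x hx
      rw [hiA] at hp
      obtain ⟨q, hq, hq2⟩ := List.mem_map.mp hp
      by_cases hqv : q.1 = v
      · rw [if_pos (beq_iff_eq.mpr hqv)] at hq2
        subst hq2
        rcases List.mem_append.mp hx with h | h
        · have := hlbd x ((huniq q hq hqv) ▸ h)
          omega
        · rw [List.mem_singleton] at h; omega
      · rw [if_neg (by simpa using hqv)] at hq2
        subst hq2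
        exact le_of_lt (hbd q hq x hx)
  · -- new key: A starts the list [i], B records first[v] = last[v] = i
    have hc' : dA.contains v = false := by revert hc; cases dA.contains v <;> simp
    have hnin : ∀ p ∈ dA.items, (p.1 == v) = false := by
      intro p hp
      have h1 : dA.items.any (fun p => p.1 == v) = false := hc'
      rw [List.any_eq_false] at h1
      simpa using h1 p hp
    have eA : occStep dA i v = (dA.insert v ([] : List Int)).insert v ([] ++ [i]) := by
      simp only [occStep, hc', Bool.not_false, if_true, PySem.Dict.modify,
        PySem.Dict.getD_insert_self]
    have eB : boundsStep (first, last) (i, v) = (first.insert v i, last.insert v i) := by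
      simp only [boundsStep, hcF, hc', Bool.not_false, if_true]
    rw [eA, eB]
    have hcA1 : (dA.insert v ([] : List Int)).contains v = true :=
      PySem.Dict.contains_insert_self dA v []
    have hiA : ((dA.insert v ([] : List Int)).insert v ([] ++ [i])).items =
        dA.items ++ [(v, [i])] := by
      rw [PySem.Dict.items_insert_of_contains _ _ hcA1,
        PySem.Dict.items_insert_of_not_contains dA _ hc', List.map_append]
      have h1 : dA.items.map (fun p => if p.1 == v then (v, [] ++ [i]) else p) = dA.items := by
        rw [List.map_congr_left (fun p hp => by rw [if_neg (by simp [hnin p hp])])]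
        exact List.map_id _
      rw [h1]
      simp
    have hiF : (first.insert v i).items = first.items ++ [(v, i)] :=
      PySem.Dict.items_insert_of_not_contains first _ (by rw [hcF]; exact hc')
    have hiL : (last.insert v i).items = last.items ++ [(v, i)] :=
      PySem.Dict.items_insert_of_not_contains last _ (by rw [hcL]; exact hc')
    refine ⟨PySem.Dict.nodup_keys_insert _ v _ (PySem.Dict.nodup_keys_insert _ v _ hnd),
      ⟨?_, ?_⟩, ?_, ?_⟩
    · rw [hiA, hiF, hrel1, List.map_append]
      rfl
    · rw [hiA, hiL, hrel2, List.map_append]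
      rfl
    · intro p hp
      rw [hiA] at hp
      rcases List.mem_append.mp hp with h | h
      · exact hok p h
      · rw [List.mem_singleton] at h
        subst h
        exact ⟨by simp, List.pairwise_singleton _ _⟩
    · intro p hp x hx
      rw [hiA] at hp
      rcases List.mem_append.mp hp with h | h
      · exact le_of_lt (hbd p h x hx)
      · rw [List.mem_singleton] at h
        subst h
        rw [List.mem_singleton] at hx
        omega

-- the two building loops stay related over the whole enumeration
theorem build_rel (ps : List (Int × Int)) : ∀ (dA : PySem.Dict Int (List Int))
    (fl : PySem.Dict Int Int × PySem.Dict Int Int),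
    dA.keys.Nodup → DRel dA fl.1 fl.2 → (∀ p ∈ dA.items, okG p.2) →
    (∀ q ∈ ps, ∀ p ∈ dA.items, ∀ x ∈ p.2, x < q.1) →
    ps.Pairwise (fun p q => p.1 < q.1) →
    ((ps.foldl (fun occ iv => occStep occ iv.1 iv.2) dA).keys.Nodup ∧
     DRel (ps.foldl (fun occ iv => occStep occ iv.1 iv.2) dA)
       (ps.foldl boundsStep fl).1 (ps.foldl boundsStep fl).2 ∧
     ∀ p ∈ (ps.foldl (fun occ iv => occStep occ iv.1 iv.2) dA).items, okG p.2) := by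
  induction ps with
  | nil => intro dA fl h1 h2 h3 _ _; exact ⟨h1, h2, h3⟩
  | cons q ps' ih =>
      intro dA fl h1 h2 h3 hbd hpw
      obtain ⟨i, v⟩ := q
      obtain ⟨f, l⟩ := fl
      obtain ⟨s1, s2, s3, s4⟩ := step_rel dA f l i v h1 h2 h3
        (fun p hp x hx => hbd (i, v) List.mem_cons_self p hp x hx)
      simp only [List.foldl_cons]
      refine ih _ _ s1 s2 s3 ?_ (List.pairwise_cons.mp hpw).2
      intro q' hq' p hp x hx
      have hxi : x ≤ i := s4 p hp x hx
      have hiq : (i, v).1 < q'.1 := (List.pairwise_cons.mp hpw).1 q' hq'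
      simp only at hiq
      omega

-- sorting B's keys is sorting A's items by key, projected to the keys
theorem sorted_keys_rel (g : List Int → Int) (dA : PySem.Dict Int (List Int))
    (dB : PySem.Dict Int Int) (hnd : dA.keys.Nodup)
    (hrel : dB.items = dA.items.map (fun p => (p.1, g p.2))) :
    PySem.List.sorted dB.keys (fun v => v) =
      (PySem.List.sorted dA.items (fun p => p.1)).map (·.1) := by
  have hkeysB : dB.keys = dA.keys := by
    simp only [PySem.Dict.keys, hrel, List.map_map]
    rfl
  have hperm : ((PySem.List.sorted dA.items (fun p => p.1)).map (·.1)).Perm dB.keys := by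
    rw [hkeysB]
    exact (PySem.List.sorted_perm dA.items (fun p => p.1) false).map (·.1)
  apply PySem.List.sorted_eq_of_perm_of_pairwise_lt _ _ _ hperm
  have h1 : ((PySem.List.sorted dA.items (fun p => p.1)).map (·.1)).Pairwise (· ≤ ·) :=
    List.pairwise_map.mpr (PySem.List.sorted_pairwise dA.items (fun p => p.1))
  have h2 : ((PySem.List.sorted dA.items (fun p => p.1)).map (·.1)).Nodup :=
    hperm.nodup_iff.mpr (hkeysB ▸ hnd)
  exact (h1.and h2).imp (fun h => lt_of_le_of_ne h.1 h.2)

-- A's pairing step on a set prev group, as nmax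
theorem pairLoopA_true (md : Int) (prev : List Int) (kv : Int × List Int) :
    pairLoopA (md, prev, true) kv = (nmax md prev kv.2, prev, false) := by
  show ((PySem.List.pyRange 0 (PySem.List.len prev)).foldl (fun md1 i =>
      (PySem.List.pyRange 0 (PySem.List.len kv.2)).foldl (fun md2 j =>
        let d := get_distance (PySem.List.pyGetD prev i 0) (PySem.List.pyGetD kv.2 j 0)
        if d > md2 then d else md2) md1) md, prev, false) = _
  rw [nestedA_eq]

-- the two pairing loops agree, and A's running max stays nonnegative
theorem pair_fold (first last : PySem.Dict Int Int) (S : List (Int × List Int))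
    (h : ∀ p ∈ S, okG p.2 ∧ first.getD p.1 0 = p.2.headD 0 ∧ last.getD p.1 0 = p.2.getLastD 0) :
    ∀ (md : Int) (prev : List Int) (ps : Bool) (po : Option Int),
    0 ≤ md →
    (ps = true → okG prev ∧ ∃ pv, po = some pv ∧
      first.getD pv 0 = prev.headD 0 ∧ last.getD pv 0 = prev.getLastD 0) →
    (ps = false → po = none) →
    (S.foldl pairLoopA (md, prev, ps)).1 =
      (S.foldl (fun st p => pairLoopB first last st p.1) (md, po)).1 ∧
    0 ≤ (S.foldl pairLoopA (md, prev, ps)).1 := by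
  induction S with
  | nil => intro md prev ps po h0 _ _; exact ⟨rfl, h0⟩
  | cons p S' ih =>
      intro md prev ps po h0 hT hF
      obtain ⟨k, l⟩ := p
      obtain ⟨hlok, hfk, hlk⟩ := h (k, l) List.mem_cons_self
      have h' : ∀ q ∈ S', okG q.2 ∧ first.getD q.1 0 = q.2.headD 0 ∧
          last.getD q.1 0 = q.2.getLastD 0 :=
        fun q hq => h q (List.mem_cons_of_mem _ hq)
      cases ps with
      | false =>
          have hpo := hF rfl
          subst hpo
          simp only [List.foldl_cons]
          have eA : pairLoopA (md, prev, false) (k, l) = (md, l, true) := rfl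
          have eB : pairLoopB first last (md, (none : Option Int)) (k, l).1 =
              (md, some k) := rfl
          rw [eA, eB]
          exact ih h' md l true _ h0 (fun _ => ⟨hlok, k, rfl, hfk, hlk⟩)
            (fun hh => absurd hh (by decide))
      | true =>
          obtain ⟨hpok, pv, hpo, hpf, hpl⟩ := hT rfl
          subst hpo
          simp only [List.foldl_cons]
          have eA := pairLoopA_true md prev (k, l)
          have eB : pairLoopB first last (md, some pv) (k, l).1 =
              (max (max md (last.getD pv 0 - first.getD k 0))
                (last.getD k 0 - first.getD pv 0), none) := rfl
          rw [eA, eB, hfk, hlk, hpf, hpl]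
          rw [nmax_eq md prev l hpok hlok]
          have h0' : 0 ≤ max (max md (prev.getLastD 0 - l.headD 0))
              (l.getLastD 0 - prev.headD 0) :=
            le_trans h0 (le_max_of_le_left (le_max_left _ _))
          exact ih h' _ prev false none h0' (fun hh => absurd hh (by decide)) (fun _ => rfl)

-- ===== VERDICT (by name: the statement is the Claim_ definition above) =====
theorem solution_spec : Claim_equal_solution := by
  intro A _
  unfold Spec_solution
  show solution A = solution_alt A
  simp only [solution, solution_alt]
  have hAfold : (PySem.List.pyRange 0 (PySem.List.len A)).foldl
      (fun occ i => occStep occ i (PySem.List.pyGetD A i 0)) PySem.Dict.empty =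
      (PySem.List.enumerate A).foldl (fun occ iv => occStep occ iv.1 iv.2) PySem.Dict.empty := by
    rw [PySem.List.enumerate_eq_map_pyRange A 0, List.foldl_map]
  rw [hAfold]
  have hpw : (PySem.List.enumerate A).Pairwise (fun p q : Int × Int => p.1 < q.1) := by
    have h1 := PySem.List.pairwise_lt_pyRange_one 0 (0 + (A.length : Int))
    rw [← PySem.List.map_fst_enumerate A 0] at h1
    exact List.pairwise_map.mp h1
  obtain ⟨hnd, ⟨hrel1, hrel2⟩, hok⟩ := build_rel (PySem.List.enumerate A) PySem.Dict.empty
    (PySem.Dict.empty, PySem.Dict.empty) (by simp [PySem.Dict.keys_empty]) ⟨rfl, rfl⟩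
    (by intro p hp; cases hp) (by intro q _ p hp; cases hp) hpw
  set dA := (PySem.List.enumerate A).foldl (fun occ iv => occStep occ iv.1 iv.2)
    PySem.Dict.empty with hdA
  set fl := (PySem.List.enumerate A).foldl boundsStep (PySem.Dict.empty, PySem.Dict.empty)
    with hfl
  rw [sorted_keys_rel (fun l => l.headD 0) dA fl.1 hnd hrel1, List.foldl_map]
  set S := PySem.List.sorted dA.items (fun p => p.1) with hSdef
  have hS : ∀ p ∈ S, okG p.2 ∧ fl.1.getD p.1 0 = p.2.headD 0 ∧
      fl.2.getD p.1 0 = p.2.getLastD 0 := by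
    intro p hp
    have hpA : p ∈ dA.items := (PySem.List.mem_sorted _ _ _ _).mp hp
    have hget : dA.get? p.1 = some p.2 := PySem.Dict.get?_of_mem_items dA hpA hnd
    have hgd : dA.getD p.1 [] = p.2 := by simp [PySem.Dict.getD, hget]
    refine ⟨hok p hpA, ?_, ?_⟩
    · rw [getD_rel (fun l => l.headD 0) rfl dA fl.1 hrel1, hgd]
    · rw [getD_rel (fun l => l.getLastD 0) rfl dA fl.2 hrel2, hgd]
  obtain ⟨heq, hposA⟩ := pair_fold fl.1 fl.2 S hS 0 [] false none le_rfl
    (fun hh => absurd hh (by decide)) (fun _ => rfl)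
  rw [← heq]
  set r := (S.foldl pairLoopA (0, ([] : List Int), false)).1
  split_ifs with h1 h2 <;> omega
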